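-- pv_equiv track=rewrite | github.com/omertahaoztop/PythonWithExercises | Egzersizler/tersinial.py | ters
-- ===== SOURCE A (Python) =====
-- def ters(yazi):
--     kelimeler=yazi.split()
--     cevap=""
--     for kelime in kelimeler:
--         if len(kelime) < 5:
--             cevap+=kelime+" "
--         else:
--             cevap=kelime[::-1]+" "
--     return cevap.strip()
-- ===== SOURCE B (Python) =====
-- def ters(yazi):
--     words = yazi.split()
--     tail = []
--     for w in reversed(words):
--         if len(w) >= 5:
--             tail = [w[::-1]] + tail
--             break
--         tail = [w] + tail
--     return " ".join(tail)
-- ===== Notes on version B (the rewrite author's own statement) =====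
-- stated objective: simpler
-- what changed: Replaces A's forward accumulate-and-reset string concatenation with a reverse scan that stops at the last long word and builds the answer once with a single space-join (no strip needed).
import Mathlib
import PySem

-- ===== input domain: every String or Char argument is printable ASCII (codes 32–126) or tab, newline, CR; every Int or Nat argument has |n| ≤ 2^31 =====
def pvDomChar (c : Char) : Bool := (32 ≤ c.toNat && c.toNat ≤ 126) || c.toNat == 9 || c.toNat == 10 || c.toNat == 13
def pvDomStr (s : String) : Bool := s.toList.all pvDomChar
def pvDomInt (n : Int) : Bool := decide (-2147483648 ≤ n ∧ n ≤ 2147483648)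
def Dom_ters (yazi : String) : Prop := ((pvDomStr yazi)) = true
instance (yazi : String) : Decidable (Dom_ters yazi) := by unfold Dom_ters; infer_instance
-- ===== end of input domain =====

-- B replaces A's accumulate-and-reset forward pass by a reverse scan stopping at the last
-- long word, then a single join; same return value, simpler construction.

-- ===== PORT A =====
-- A: split; fold accumulating 'cevap': a short word is appended with a space, a long
-- word resets 'cevap' to its reversal plus a space; finally strip.
def ters (yazi : String) : String :=
  let kelimeler := PySem.Chars.split₀ yazi.toList
  let cevap := kelimeler.foldl
    (fun cevap kelime =>
      if kelime.length < 5 then cevap ++ kelime ++ [' ']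
      else kelime.reverse ++ [' ']) ([] : List Char)
  String.ofList (PySem.Chars.strip cevap)

-- ===== PORT B =====
-- B: scan the words from the end, prepending to 'tail'; stop at the first long word
-- (prepending its reversal); join with single spaces.
def tersAltGo : List (List Char) → List (List Char) → List (List Char)
  | [], tail => tail
  | w :: rest, tail =>
      if 5 ≤ w.length then w.reverse :: tail
      else tersAltGo rest (w :: tail)

def ters_alt (yazi : String) : String :=
  let words := PySem.Chars.split₀ yazi.toList
  String.ofList (PySem.Chars.join [' '] (tersAltGo words.reverse []))

-- ===== PRECONDITION & SPEC =====
def Spec_ters (yazi : String) (out : String) : Prop := out = ters_alt yazi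
instance (yazi : String) (out : String) : Decidable (Spec_ters yazi out) := by unfold Spec_ters; infer_instance

-- ===== CLAIM (what is proved, stated in full; the proofs are below) =====
def Claim_equal_ters : Prop := ∀ (yazi : String), Dom_ters yazi → Spec_ters yazi (ters yazi)

-- ===== LEMMAS AND PROOFS =====

-- a 'good' word: nonempty and contains no Python whitespace (what split() produces)
def GoodWord (w : List Char) : Prop := w ≠ [] ∧ ∀ c ∈ w, PySem.Chars.isspace c = false

-- every word produced by split() is good
theorem goodWord_split_go (s cur : List Char) (acc : List (List Char))
    (hcur : ∀ c ∈ cur, PySem.Chars.isspace c = false)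
    (hacc : ∀ w ∈ acc, GoodWord w) :
    ∀ w ∈ PySem.Chars.split₀.go s cur acc, GoodWord w := by
  induction s generalizing cur acc with
  | nil =>
    intro w hw
    simp only [PySem.Chars.split₀.go] at hw
    by_cases hc : cur.isEmpty = true
    · simp [hc] at hw
      exact hacc w (by simpa using hw)
    · simp [hc] at hw
      rcases hw with hw | hw
      · exact hacc w hw
      · subst hw
        refine ⟨by simpa [List.isEmpty_iff] using hc, ?_⟩
        intro c hc'
        exact hcur c (by simpa using hc')
  | cons c rest ih =>
    intro w hw
    simp only [PySem.Chars.split₀.go] at hw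
    by_cases hs : PySem.Chars.isspace c = true
    · by_cases hc : cur.isEmpty = true
      · simp [hs, hc] at hw
        exact ih [] acc (by simp) hacc w hw
      · simp [hs, hc] at hw
        refine ih [] (cur.reverse :: acc) (by simp) ?_ w hw
        intro v hv
        rcases List.mem_cons.mp hv with hv | hv
        · subst hv
          refine ⟨by simpa [List.isEmpty_iff] using hc, ?_⟩
          intro d hd
          exact hcur d (by simpa using hd)
        · exact hacc v hv
    · simp [hs] at hw
      refine ih (c :: cur) acc ?_ hacc w hw
      intro d hd
      rcases List.mem_cons.mp hd with hd | hd
      · subst hd; simpa using hs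
      · exact hcur d hd

theorem goodWord_split (s : List Char) : ∀ w ∈ PySem.Chars.split₀ s, GoodWord w := by
  simpa [PySem.Chars.split₀] using goodWord_split_go s [] [] (by simp) (by simp)

-- B's scan appends its 'tail' argument at the end
theorem tersAltGo_tail (r : List (List Char)) :
    ∀ tail, tersAltGo r tail = tersAltGo r [] ++ tail := by
  induction r with
  | nil => intro tail; simp [tersAltGo]
  | cons w rest ih =>
    intro tail
    by_cases h : 5 ≤ w.length
    · simp [tersAltGo, h]
    · simp only [tersAltGo, if_neg h]
      rw [ih (w :: tail), ih [w], List.append_assoc]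
      simp

-- every element of B's scan result is good, given the inputs are
theorem tersAltGo_good (r : List (List Char)) :
    ∀ tail, (∀ w ∈ r, GoodWord w) → (∀ w ∈ tail, GoodWord w) →
    ∀ w ∈ tersAltGo r tail, GoodWord w := by
  induction r with
  | nil => intro tail _ ht w hw; exact ht w hw
  | cons v rest ih =>
    intro tail hr ht w hw
    by_cases h : 5 ≤ v.length
    · simp only [tersAltGo, if_pos h] at hw
      rcases List.mem_cons.mp hw with hw | hw
      · subst hw
        obtain ⟨h1, h2⟩ := hr v (by simp)
        exact ⟨by simpa using h1, by intro c hc; exact h2 c (by simpa using hc)⟩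
      · exact ht w hw
    · simp only [tersAltGo, if_neg h] at hw
      refine ih (v :: tail) (fun u hu => hr u (by simp [hu])) ?_ w hw
      intro u hu
      rcases List.mem_cons.mp hu with hu | hu
      · subst hu; exact hr u (by simp)
      · exact ht u hu

-- the word-with-trailing-space rendering A's fold builds
def sj (ts : List (List Char)) : List Char := (ts.map (fun w => w ++ [' '])).flatten

theorem sj_append (a b : List (List Char)) : sj (a ++ b) = sj a ++ sj b := by
  simp [sj]

-- A's fold equals B's scan rendered with trailing spaces
theorem fold_eq_sj (ws : List (List Char)) :
    ws.foldl (fun cevap kelime =>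
      if kelime.length < 5 then cevap ++ kelime ++ [' ']
      else kelime.reverse ++ [' ']) ([] : List Char)
    = sj (tersAltGo ws.reverse []) := by
  induction ws using List.reverseRecOn with
  | nil => simp [tersAltGo, sj]
  | append_singleton ws w ih =>
    rw [List.foldl_append, List.foldl_cons, List.foldl_nil, ih]
    by_cases h : w.length < 5
    · rw [if_pos h]
      rw [List.reverse_append, List.reverse_singleton]
      show _ = sj (tersAltGo (w :: ws.reverse) [])
      rw [show tersAltGo (w :: ws.reverse) [] = tersAltGo ws.reverse [w] by
        simp [tersAltGo, Nat.not_le.mpr h]]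
      rw [tersAltGo_tail ws.reverse [w], sj_append]
      simp [sj]
    · rw [if_neg h]
      rw [List.reverse_append, List.reverse_singleton]
      show _ = sj (tersAltGo (w :: ws.reverse) [])
      rw [show tersAltGo (w :: ws.reverse) [] = [w.reverse] by
        simp [tersAltGo, Nat.le_of_not_lt h]]
      simp [sj]

-- sj is join-plus-one-trailing-space on a nonempty list
theorem sj_eq_join (t : List Char) (ts : List (List Char)) :
    sj (t :: ts) = PySem.Chars.join [' '] (t :: ts) ++ [' '] := by
  induction ts generalizing t with
  | nil => simp [sj, PySem.Chars.join, List.intercalate]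
  | cons u ts ih =>
    rw [PySem.Chars.join_cons_cons]
    have : sj (t :: u :: ts) = (t ++ [' ']) ++ sj (u :: ts) := by simp [sj]
    rw [this, ih u]
    simp

theorem join_ne_nil (t : List Char) (ts : List (List Char)) (ht : t ≠ []) :
    PySem.Chars.join [' '] (t :: ts) ≠ [] := by
  cases ts with
  | nil => simpa [PySem.Chars.join_singleton] using ht
  | cons u ts =>
    rw [PySem.Chars.join_cons_cons]
    cases t with
    | nil => exact absurd rfl ht
    | cons c cs => simp

-- dropWhile strips nothing when the head is not whitespace (or the list is empty)
theorem dropWhile_id_of_nonspace (l : List Char)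
    (h : ∀ c ∈ l, PySem.Chars.isspace c = false) :
    l.dropWhile PySem.Chars.isspace = l := by
  cases l with
  | nil => simp
  | cons c cs => rw [List.dropWhile_cons_of_neg (by simp [h c (by simp)])]

-- rstrip leaves a join of good words unchanged
theorem rstrip_join (ts : List (List Char)) (h : ∀ w ∈ ts, GoodWord w) :
    PySem.Chars.rstrip (PySem.Chars.join [' '] ts) = PySem.Chars.join [' '] ts := by
  induction ts with
  | nil => simp [PySem.Chars.join, List.intercalate, PySem.Chars.rstrip]
  | cons t ts ih =>
    cases ts with
    | nil =>
      rw [PySem.Chars.join_singleton]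
      obtain ⟨-, h2⟩ := h t (by simp)
      simp only [PySem.Chars.rstrip]
      rw [dropWhile_id_of_nonspace _ (fun c hc => h2 c (List.mem_reverse.mp hc)),
          List.reverse_reverse]
    | cons u ts' =>
      rw [PySem.Chars.join_cons_cons]
      have hih := ih (fun w hw => h w (List.mem_cons_of_mem _ hw))
      have hne : PySem.Chars.join [' '] (u :: ts') ≠ [] :=
        join_ne_nil u ts' (h u (by simp)).1
      simp only [PySem.Chars.rstrip] at hih ⊢
      have hdw : (PySem.Chars.join [' '] (u :: ts')).reverse.dropWhile PySem.Chars.isspace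
          = (PySem.Chars.join [' '] (u :: ts')).reverse := by
        have := congrArg List.reverse hih
        simpa using this
      rw [List.reverse_append, List.reverse_append, List.dropWhile_append, hdw]
      simp [hne]

-- strip of sj of a good nonempty list is the join
theorem strip_sj (t : List Char) (ts : List (List Char))
    (h : ∀ w ∈ t :: ts, GoodWord w) :
    PySem.Chars.strip (sj (t :: ts)) = PySem.Chars.join [' '] (t :: ts) := by
  rw [sj_eq_join]
  obtain ⟨h1, h2⟩ := h t (by simp)
  have hhead : ∃ c cs, PySem.Chars.join [' '] (t :: ts) = c :: cs
      ∧ PySem.Chars.isspace c = false := by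
    cases t with
    | nil => exact absurd rfl h1
    | cons c cs =>
      cases ts with
      | nil => exact ⟨c, cs, by rw [PySem.Chars.join_singleton], h2 c (by simp)⟩
      | cons u ts' =>
        exact ⟨c, cs ++ [' '] ++ PySem.Chars.join [' '] (u :: ts'),
          by rw [PySem.Chars.join_cons_cons]; simp, h2 c (by simp)⟩
  obtain ⟨c, cs, hJ, hc⟩ := hhead
  have hr := rstrip_join (t :: ts) h
  simp only [PySem.Chars.strip, PySem.Chars.lstrip]
  rw [hJ, List.cons_append, List.dropWhile_cons_of_neg (by simp [hc]),
      ← List.cons_append, ← hJ]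
  simp only [PySem.Chars.rstrip] at hr ⊢
  rw [List.reverse_append, show ([' '] : List Char).reverse = [' '] from rfl,
      List.singleton_append, List.dropWhile_cons_of_pos (by decide)]
  exact hr

-- ===== VERDICT (by name: the statement is the Claim_ definition above) =====
theorem ters_spec : Claim_equal_ters := by
  intro yazi _
  unfold Spec_ters ters ters_alt
  simp only []
  rw [fold_eq_sj]
  cases hgo : tersAltGo (PySem.Chars.split₀ yazi.toList).reverse [] with
  | nil => simp [sj, PySem.Chars.strip, PySem.Chars.lstrip, PySem.Chars.rstrip]
  | cons t ts =>
    have hgood : ∀ w ∈ t :: ts, GoodWord w := by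
      rw [← hgo]
      exact tersAltGo_good _ []
        (fun w hw => goodWord_split yazi.toList w (List.mem_reverse.mp hw)) (by simp)
    rw [strip_sj t ts hgood]
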